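-- pv_equiv track=rewrite | github.com/RafaFischerReichert/Spotipy | model/Playlist_Tools.py | identify_genre_playlists
-- ===== SOURCE A (Python) =====
-- from typing import Dict, List, Set, Any
--
-- def identify_genre_playlists(existing_playlists: Dict[str, str]) -> Dict[str, str]:
--     """Identify playlists that are likely genre playlists"""
--     genre_playlists = {}
--
--     genre_keywords = [
--         'metal', 'rock', 'pop', 'hip hop', 'rap', 'jazz', 'classical', 'electronic',
--         'folk', 'country', 'r&b', 'blues', 'reggae', 'punk', 'indie', 'alternative',
--         'brazilian', 'japanese', 'anime', 'emo', 'industrial', 'glam', 'sertanejo',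
--         'mpb', 'hardcore', 'celtic', 'medieval', 'comedy', 'electro', 'edm'
--     ]
--
--     for playlist_name, playlist_id in existing_playlists.items():
--         name_lower = playlist_name.lower()
--
--         # Check if playlist name contains genre keywords
--         for keyword in genre_keywords:
--             if keyword in name_lower:
--                 genre_playlists[playlist_name] = playlist_id
--                 break
--
--     return genre_playlists
-- ===== SOURCE B (Python) =====
-- from typing import Dict, List, Set, Any
--
-- GENRE_KEYWORDS = [
--     'metal', 'rock', 'pop', 'hip hop', 'rap', 'jazz', 'classical', 'electronic',
--     'folk', 'country', 'r&b', 'blues', 'reggae', 'punk', 'indie', 'alternative',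
--     'brazilian', 'japanese', 'anime', 'emo', 'industrial', 'glam', 'sertanejo',
--     'mpb', 'hardcore', 'celtic', 'medieval', 'comedy', 'electro', 'edm'
-- ]
--
--
-- def _has_genre(low: str) -> bool:
--     # single left-to-right scan over the string: at each position, try to
--     # match a keyword starting there (naive multi-pattern matcher)
--     for i in range(len(low) + 1):
--         rest = low[i:]
--         for k in GENRE_KEYWORDS:
--             if rest.startswith(k):
--                 return True
--     return False
--
--
-- def identify_genre_playlists(existing_playlists: Dict[str, str]) -> Dict[str, str]:
--     """Identify playlists that are likely genre playlists"""
--     return {name: pid for name, pid in existing_playlists.items()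
--             if _has_genre(name.lower())}
-- ===== Notes on version B (the rewrite author's own statement) =====
-- stated objective: alternative
-- what changed: Replaces A's dict-building loop with an inner per-keyword substring scan by a filtering dict comprehension over a single left-to-right position scan of the lowered name that tries to match each keyword as a prefix at every position (naive multi-pattern matcher).
import Mathlib
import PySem

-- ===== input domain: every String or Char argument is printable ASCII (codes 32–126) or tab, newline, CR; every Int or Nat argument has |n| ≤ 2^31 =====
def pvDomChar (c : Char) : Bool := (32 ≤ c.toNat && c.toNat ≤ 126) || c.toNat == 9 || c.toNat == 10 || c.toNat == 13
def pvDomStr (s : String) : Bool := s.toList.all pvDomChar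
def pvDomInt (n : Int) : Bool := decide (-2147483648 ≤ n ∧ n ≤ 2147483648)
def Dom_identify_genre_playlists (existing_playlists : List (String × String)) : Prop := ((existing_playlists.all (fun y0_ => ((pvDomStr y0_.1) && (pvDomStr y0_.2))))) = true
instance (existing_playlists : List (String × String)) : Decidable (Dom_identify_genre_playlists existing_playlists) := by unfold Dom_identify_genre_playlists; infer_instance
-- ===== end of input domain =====

-- B filters via a single left-to-right position scan of the lowered name matching keywords as prefixes,
-- instead of A's per-keyword substring scan with a dict built by insertion; return values proved equal on
-- association lists with distinct keys (the dict representation).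


-- ===== PORT A =====
def genreKeywords : List String :=
  ["metal", "rock", "pop", "hip hop", "rap", "jazz", "classical", "electronic",
   "folk", "country", "r&b", "blues", "reggae", "punk", "indie", "alternative",
   "brazilian", "japanese", "anime", "emo", "industrial", "glam", "sertanejo",
   "mpb", "hardcore", "celtic", "medieval", "comedy", "electro", "edm"]

-- the inner 'for keyword … if keyword in name_lower: insert; break' inserts iff some keyword is in name_lower
def identify_genre_playlists (existing_playlists : List (String × String)) : List (String × String) :=
  (existing_playlists.foldl
    (fun (genre_playlists : PySem.Dict String String) p =>
      let name_lower := PySem.Str.lower p.1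
      if genreKeywords.any (fun keyword => PySem.Str.isIn keyword name_lower)
      then genre_playlists.insert p.1 p.2
      else genre_playlists)
    PySem.Dict.empty).items

-- ===== PORT B =====
-- Source B's _has_genre: for i in range(len(low)+1): if any keyword startswith at position i: True
def altHasGenre (low : List Char) : Bool :=
  (List.range (low.length + 1)).any (fun i =>
    genreKeywords.any (fun k => PySem.Chars.startswith (low.drop i) k.toList))

def identify_genre_playlists_alt (existing_playlists : List (String × String)) : List (String × String) :=
  existing_playlists.filter (fun p => altHasGenre (PySem.Chars.lower p.1.toList))

-- ===== PRECONDITION & SPEC =====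
-- Pre_ restricts to association lists with pairwise-distinct keys: exactly the lists that represent a
-- Python dict (A's parameter is a dict, whose .items() never repeats a key), so no input of A is excluded.
def Pre_identify_genre_playlists (existing_playlists : List (String × String)) : Prop :=
  (existing_playlists.map Prod.fst).Nodup
instance (existing_playlists : List (String × String)) : Decidable (Pre_identify_genre_playlists existing_playlists) := by unfold Pre_identify_genre_playlists; infer_instance

def pvWitness_identify_genre_playlists : (List (String × String)) :=
  [("My Rock Mix", "id1"), ("Daily Drive", "id2"), ("R&B hits", "id3")]

def Spec_identify_genre_playlists (existing_playlists : List (String × String)) (out : List (String × String)) : Prop := out = identify_genre_playlists_alt existing_playlists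
instance (existing_playlists : List (String × String)) (out : List (String × String)) : Decidable (Spec_identify_genre_playlists existing_playlists out) := by unfold Spec_identify_genre_playlists; infer_instance

-- ===== CLAIM (what is proved, stated in full; the proofs are below) =====
def Claim_equal_identify_genre_playlists : Prop := ∀ (existing_playlists : List (String × String)), Dom_identify_genre_playlists existing_playlists → Pre_identify_genre_playlists existing_playlists → Spec_identify_genre_playlists existing_playlists (identify_genre_playlists existing_playlists)

-- ===== LEMMAS AND PROOFS =====

-- B's position scan finds a keyword iff some keyword is an infix (= Python's 'in') of the lowered name
theorem altHasGenre_eq_any_isIn (low : List Char) :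
    altHasGenre low = genreKeywords.any (fun k => PySem.Chars.isIn k.toList low) := by
  unfold altHasGenre
  rw [Bool.eq_iff_iff]
  simp only [List.any_eq_true, List.mem_range]
  constructor
  · rintro ⟨i, _, k, hk, hpre⟩
    exact ⟨k, hk, (PySem.Chars.exists_prefix_drop_iff_isIn k.toList low).mp
      ⟨i, (PySem.Chars.startswith_iff _ _).mp hpre⟩⟩
  · rintro ⟨k, hk, hin⟩
    obtain ⟨j, hj⟩ := (PySem.Chars.exists_prefix_drop_iff_isIn k.toList low).mpr hin
    refine ⟨min j low.length, by omega, k, hk, ?_⟩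
    rw [PySem.Chars.startswith_iff]
    rcases le_or_gt j low.length with hle | hgt
    · simpa [min_eq_left hle] using hj
    · have h1 : low.drop j = [] := List.drop_eq_nil_of_le (le_of_lt hgt)
      have h2 : low.drop (min j low.length) = [] := by
        rw [min_eq_right (le_of_lt hgt)]
        exact List.drop_length
      rw [h1] at hj; rw [h2]; exact hj

-- the per-pair condition of A equals the per-pair condition of B
theorem cond_eq (p : String × String) :
    genreKeywords.any (fun keyword => PySem.Str.isIn keyword (PySem.Str.lower p.1))
      = altHasGenre (PySem.Chars.lower p.1.toList) := by
  rw [altHasGenre_eq_any_isIn]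
  simp [pysem]

-- A's dict-building loop over fresh distinct keys produces d.items ++ filter
theorem loop_items (C : String × String → Bool) (ps : List (String × String))
    (d : PySem.Dict String String) (hnd : d.keys.Nodup)
    (hfresh : ∀ p ∈ ps, d.contains p.1 = false)
    (hkeys : (ps.map Prod.fst).Nodup) :
    (ps.foldl (fun d p => if C p then d.insert p.1 p.2 else d) d).items
      = d.items ++ ps.filter C := by
  induction ps generalizing d with
  | nil => simp
  | cons a t ih =>
      simp only [List.map_cons, List.nodup_cons] at hkeys
      simp only [List.foldl_cons]
      by_cases hC : C a = true
      · rw [hC]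
        simp only [if_true]
        have hfa : d.contains a.1 = false := hfresh a (List.mem_cons_self ..)
        have hrec := ih (d.insert a.1 a.2)
          (PySem.Dict.nodup_keys_insert _ _ _ hnd)
          (by
            intro p hp
            rw [PySem.Dict.contains_insert]
            have hne : p.1 ≠ a.1 := by
              intro he
              exact hkeys.1 (he ▸ List.mem_map_of_mem hp)
            simp [hne, hfresh p (List.mem_cons_of_mem _ hp)])
          hkeys.2
        rw [hrec, PySem.Dict.items_insert_of_not_contains d a.2 hfa]
        simp [hC]
      · rw [if_neg hC]
        rw [ih d hnd (fun p hp => hfresh p (List.mem_cons_of_mem _ hp)) hkeys.2]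
        simp [hC]

-- ===== VERDICT (by name: the statement is the Claim_ definition above) =====
theorem identify_genre_playlists_spec : Claim_equal_identify_genre_playlists := by
  intro ps _ hpre
  unfold Spec_identify_genre_playlists identify_genre_playlists identify_genre_playlists_alt
  rw [loop_items _ ps PySem.Dict.empty (by simp [pysem])
      (by intro p _; simp [pysem]) hpre]
  simp only [PySem.Dict.empty, List.nil_append]
  · apply List.filter_congr
    intro p _
    exact cond_eq p
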